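-- pv_equiv track=rewrite | github.com/hervebronnimann/adventofcode | 2023/14/14.2.py | shift_horiz
-- ===== SOURCE A (Python) =====
-- def shift_horiz(x:str, dir:bool):
--     y = x.split("#")
--     for i,z in enumerate(y):
--         if dir:
--             y[i] = 'O'*z.count('O') + '.'*z.count('.')
--         else:
--             y[i] = '.'*z.count('.') + 'O'*z.count('O')
--     return '#'.join(y)
-- ===== SOURCE B (Python) =====
-- def shift_horiz(x: str, dir: bool):
--     # single streaming pass: two counters per '#'-separated segment, one output buffer
--     buf = []
--     o = d = 0
--     for c in x:
--         if c == '#':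
--             buf.append('O' * o + '.' * d if dir else '.' * d + 'O' * o)
--             buf.append('#')
--             o = d = 0
--         elif c == 'O':
--             o += 1
--         elif c == '.':
--             d += 1
--     buf.append('O' * o + '.' * d if dir else '.' * d + 'O' * o)
--     return ''.join(buf)
-- ===== Notes on version B (the rewrite author's own statement) =====
-- stated objective: alternative
-- what changed: Replaces split('#') + per-segment count('O')/count('.') + join with a single streaming pass over the characters that keeps two counters per segment and emits each rebuilt segment when a '#' is reached.
import Mathlib
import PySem

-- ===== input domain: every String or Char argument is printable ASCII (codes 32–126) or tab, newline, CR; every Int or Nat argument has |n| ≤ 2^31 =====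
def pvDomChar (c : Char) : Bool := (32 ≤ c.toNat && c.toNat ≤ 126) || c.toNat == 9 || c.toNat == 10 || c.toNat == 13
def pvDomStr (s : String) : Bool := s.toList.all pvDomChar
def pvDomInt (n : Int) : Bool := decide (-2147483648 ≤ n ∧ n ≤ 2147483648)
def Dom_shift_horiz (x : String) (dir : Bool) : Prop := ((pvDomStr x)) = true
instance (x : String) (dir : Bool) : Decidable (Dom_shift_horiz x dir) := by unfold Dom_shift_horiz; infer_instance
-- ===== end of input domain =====

-- B replaces A's split/count/join pipeline by one streaming pass with two counters per segment (objective: alternative decomposition, same cost).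

-- ===== PORT A =====
-- literal port of A: split on '#', rebuild each segment from its 'O'/'.' counts, join with '#'
def shift_horiz (x : String) (dir : Bool) : String :=
  String.mk (PySem.Chars.join ['#']
    ((PySem.Chars.splitOn x.toList ['#']).map (fun z =>
      if dir then
        PySem.List.pyRepeat ['O'] ((PySem.Chars.count z ['O'] : Int)) ++
        PySem.List.pyRepeat ['.'] ((PySem.Chars.count z ['.'] : Int))
      else
        PySem.List.pyRepeat ['.'] ((PySem.Chars.count z ['.'] : Int)) ++
        PySem.List.pyRepeat ['O'] ((PySem.Chars.count z ['O'] : Int)))))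

-- ===== PORT B =====
-- the segment string B emits for o rocks and d dots ('O'*o+'.'*d if dir else '.'*d+'O'*o)
def pvSegB (dir : Bool) (o d : Nat) : List Char :=
  if dir then List.replicate o 'O' ++ List.replicate d '.'
  else List.replicate d '.' ++ List.replicate o 'O'

-- B's loop body: what one character does to the state (buffer, o-count, dot-count)
def pvStepB (dir : Bool) (st : List (List Char) × Nat × Nat) (c : Char) :
    List (List Char) × Nat × Nat :=
  if c = '#' then (st.1 ++ [pvSegB dir st.2.1 st.2.2, ['#']], 0, 0)
  else if c = 'O' then (st.1, st.2.1 + 1, st.2.2)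
  else if c = '.' then (st.1, st.2.1, st.2.2 + 1)
  else st

-- B's final step: append the last segment to the buffer and join it
def pvFinishB (dir : Bool) (st : List (List Char) × Nat × Nat) : String :=
  String.mk (PySem.Chars.join [] (st.1 ++ [pvSegB dir st.2.1 st.2.2]))

-- literal port of B: one fold over the characters maintaining (buffer, o-count, dot-count)
def shift_horiz_alt (x : String) (dir : Bool) : String :=
  pvFinishB dir (x.toList.foldl (pvStepB dir) ([], 0, 0))

-- ===== PRECONDITION & SPEC =====
def Spec_shift_horiz (x : String) (dir : Bool) (out : String) : Prop := out = shift_horiz_alt x dir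
instance (x : String) (dir : Bool) (out : String) : Decidable (Spec_shift_horiz x dir out) := by unfold Spec_shift_horiz; infer_instance

-- ===== CLAIM (what is proved, stated in full; the proofs are below) =====
def Claim_equal_shift_horiz : Prop := ∀ (x : String) (dir : Bool), Dom_shift_horiz x dir → Spec_shift_horiz x dir (shift_horiz x dir)

-- ===== LEMMAS AND PROOFS =====

-- clean recursion computing split-on-'#' with an accumulated (reversed) current segment
def pvSplitChar : List Char → List Char → List (List Char)
  | [], cur => [cur.reverse]
  | c :: rest, cur =>
      if c = '#' then cur.reverse :: pvSplitChar rest []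
      else pvSplitChar rest (c :: cur)

-- common denominator: the answer for the remaining characters, given the current counters
def pvCore (dir : Bool) : List Char → Nat → Nat → List Char
  | [], o, d => pvSegB dir o d
  | c :: rest, o, d =>
      if c = '#' then pvSegB dir o d ++ '#' :: pvCore dir rest 0 0
      else if c = 'O' then pvCore dir rest (o + 1) d
      else if c = '.' then pvCore dir rest o (d + 1)
      else pvCore dir rest o d

theorem pvCount_go_eq (c : Char) (l : List Char) : ∀ (fuel acc : Nat), l.length ≤ fuel →
    PySem.Chars.count.go [c] fuel l acc = acc + l.count c := by
  induction l with
  | nil => intro fuel acc _; cases fuel <;> simp [PySem.Chars.count.go]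
  | cons h t ih =>
      intro fuel acc hf
      cases fuel with
      | zero => simp at hf
      | succ f =>
          have ht : t.length ≤ f := by simp at hf; omega
          by_cases hc : c = h
          · subst hc
            simp [PySem.Chars.count.go, List.isPrefixOf, ih f (acc + 1) ht, List.count_cons]
            omega
          · have : ([c].isPrefixOf (h :: t)) = false := by
              simp [List.isPrefixOf]; exact fun hh => hc hh
            simp [PySem.Chars.count.go, this, ih f acc ht, List.count_cons,
              (by simp [beq_iff_eq]; exact fun hh => (hc hh.symm).elim : (h == c) = false)]

theorem pvCount_single (c : Char) (l : List Char) :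
    PySem.Chars.count l [c] = l.count c := by
  simp [PySem.Chars.count, pvCount_go_eq c l l.length 0 le_rfl]

theorem pvSplitOn_go_eq (l : List Char) : ∀ (fuel : Nat) (cur : List Char)
    (acc : List (List Char)), l.length ≤ fuel →
    PySem.Chars.splitOn.go ['#'] fuel l cur acc = acc.reverse ++ pvSplitChar l cur := by
  induction l with
  | nil => intro fuel cur acc _; cases fuel <;> simp [PySem.Chars.splitOn.go, pvSplitChar]
  | cons h t ih =>
      intro fuel cur acc hf
      cases fuel with
      | zero => simp at hf
      | succ f =>
          have ht : t.length ≤ f := by simp at hf; omega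
          by_cases hc : h = '#'
          · subst hc
            simp [PySem.Chars.splitOn.go, List.isPrefixOf, ih f [] (cur.reverse :: acc) ht,
              pvSplitChar]
          · have hp : (['#'].isPrefixOf (h :: t)) = false := by
              simp [List.isPrefixOf]; exact fun hh => (hc hh.symm).elim
            simp [PySem.Chars.splitOn.go, hp, ih f (h :: cur) acc ht, pvSplitChar, hc]

theorem pvSplitOn_eq (l : List Char) :
    PySem.Chars.splitOn l ['#'] = pvSplitChar l [] := by
  simpa using pvSplitOn_go_eq l (l.length + 1) [] [] (by omega)

theorem pvSplitChar_ne_nil (l cur : List Char) : pvSplitChar l cur ≠ [] := by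
  induction l generalizing cur with
  | nil => simp [pvSplitChar]
  | cons h t ih =>
      by_cases hc : h = '#' <;> simp [pvSplitChar, hc] <;> exact ih _

theorem pvJoin_nil_flatten (ps : List (List Char)) :
    PySem.Chars.join [] ps = ps.flatten := by
  induction ps with
  | nil => simp [PySem.Chars.join_nil]
  | cons a rest ih =>
      cases rest with
      | nil => simp [PySem.Chars.join_singleton]
      | cons b r => simp [PySem.Chars.join_cons_cons, ih]

-- A-side characterisation: joining the rebuilt segments equals pvCore
theorem pvA_eq_core (dir : Bool) (l : List Char) : ∀ (cur : List Char),
    PySem.Chars.join ['#']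
      ((pvSplitChar l cur).map (fun z => pvSegB dir (z.count 'O') (z.count '.'))) =
    pvCore dir l (cur.count 'O') (cur.count '.') := by
  induction l with
  | nil => intro cur; simp [pvSplitChar, pvCore, PySem.Chars.join_singleton]
  | cons h t ih =>
      intro cur
      by_cases hc : h = '#'
      · subst hc
        obtain ⟨b, r, hbr⟩ : ∃ b r, pvSplitChar t [] = b :: r := by
          cases hsp : pvSplitChar t [] with
          | nil => exact absurd hsp (pvSplitChar_ne_nil t [])
          | cons b r => exact ⟨b, r, rfl⟩
        have := ih ([] : List Char)
        rw [hbr] at this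
        rw [show pvSplitChar ('#' :: t) cur = cur.reverse :: pvSplitChar t [] from by
          simp [pvSplitChar]]
        rw [hbr, List.map_cons, List.map_cons, PySem.Chars.join_cons_cons]
        simp only [List.map_cons] at this
        simp [pvCore, this, List.count_reverse]
      · by_cases hO : h = 'O'
        · subst hO
          simp [pvSplitChar, pvCore, ih ('O' :: cur), List.count_cons]
        · by_cases hD : h = '.'
          · subst hD
            simp [pvSplitChar, pvCore, hc, ih ('.' :: cur), List.count_cons]
          · simp [pvSplitChar, pvCore, hc, hO, hD, ih (h :: cur), List.count_cons,
              (by simp [beq_iff_eq]; exact hO : (h == 'O') = false),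
              (by simp [beq_iff_eq]; exact hD : (h == '.') = false)]

-- B-side characterisation: the fold's final buffer flattens to pvCore
theorem pvB_eq_core (dir : Bool) (l : List Char) : ∀ (buf : List (List Char)) (o d : Nat),
    ((l.foldl (pvStepB dir) (buf, o, d)).1 ++
      [pvSegB dir (l.foldl (pvStepB dir) (buf, o, d)).2.1
        (l.foldl (pvStepB dir) (buf, o, d)).2.2]).flatten =
    buf.flatten ++ pvCore dir l o d := by
  induction l with
  | nil => intro buf o d; simp [pvCore]
  | cons h t ih =>
      intro buf o d
      rw [List.foldl_cons]
      by_cases hc : h = '#'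
      · subst hc
        rw [show pvStepB dir (buf, o, d) '#' = (buf ++ [pvSegB dir o d, ['#']], 0, 0) from by
          simp [pvStepB]]
        rw [ih (buf ++ [pvSegB dir o d, ['#']]) 0 0]
        simp [pvCore]
      · by_cases hO : h = 'O'
        · subst hO
          rw [show pvStepB dir (buf, o, d) 'O' = (buf, o + 1, d) from by simp [pvStepB]]
          rw [ih buf (o + 1) d]; simp [pvCore]
        · by_cases hD : h = '.'
          · subst hD
            rw [show pvStepB dir (buf, o, d) '.' = (buf, o, d + 1) from by simp [pvStepB]]
            rw [ih buf o (d + 1)]; simp [pvCore, hc]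
          · rw [show pvStepB dir (buf, o, d) h = (buf, o, d) from by simp [pvStepB, hc, hO, hD]]
            rw [ih buf o d]; simp [pvCore, hc, hO, hD]

-- ===== VERDICT (by name: the statement is the Claim_ definition above) =====
theorem shift_horiz_spec : Claim_equal_shift_horiz := by
  intro x dir _
  unfold Spec_shift_horiz shift_horiz shift_horiz_alt pvFinishB
  rw [pvJoin_nil_flatten, pvB_eq_core dir x.toList [] 0 0]
  
  simp only [pvSplitOn_eq, PySem.List.pyRepeat_singleton, pvCount_single, Int.toNat_natCast,
    List.flatten_nil, List.nil_append]
  have := pvA_eq_core dir x.toList []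
  simp only [List.count_nil] at this
  rw [← this]
  simp only [pvSegB]
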